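-- pv_equiv track=rewrite | github.com/MinRayDev/Projet-S1 | utils/shapes.py | gen_circle
-- ===== SOURCE A (Python) =====
-- import math
--
-- def add_space(string: str) -> str:
--     """Ajoute des espaces entre tous les caractères d'un string et le retourne.
--
--     :param string: String auquel il faut ajouter des espaces.
--
--     :return: String avec des espaces.
--     :rtype: str.
--     """
--     string_to_return: str = ""
--
--     for char in string:
--         # Si le caractère n'est pas un saut de ligne on ajoute un espace
--         string_to_return += char + " " if char != "\n" else char
--
--     return string_to_return
--
-- def gen_circle(size: int) -> str:
--     """Génère le string d'un cercle et le retourne.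
--
--     :param size: Taille du cercle.
--
--     :return: String du cercle.
--     :rtype: str.
--
--     """
--     string_to_return: str = ""
--
--     # Première partie du cercle.
--     # Pour toutes les lignes de cette partie on va dessiner plus ou moins de 0 et de 1 en fonction de la ligne, le nombre de 1 augmente et de 0 diminue lorsque le nombre d'itérations augmente.
--     for x in range(size // (3 * 2)):
--         string_to_return += "0" * (int(size / (3 * 2)) - x)
--         string_to_return += "1" * (size - (int(size / (3 * 2)) - x) * 2)
--         string_to_return += "0" * (int(size / (3 * 2)) - x)
--         string_to_return += "\n"
--
--     # Seconde partie du cercle.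
--     # Pour toutes les lignes de cette partie on va dessiner que des 1.
--     for x in range(math.ceil(size - (size // 3))):
--         if x <= size:
--             string_to_return += "1" * size
--             string_to_return += "\n"
--         else:
--             string_to_return += "1" * int(size / 3)
--             string_to_return += "\n"
--
--     # Trosième partie du losange.
--     # Pour toutes les lignes de cette partie on va dessiner plus ou moins de 0 et de 1 en fonction de la ligne, le nombre de 1 diminue et de 0 augmente lorsque le nombre d'itérations augmente.
--     for x in range(int(size / (3 * 2))):
--         string_to_return += "0" * (x + 1)
--         string_to_return += "1" * (size - (x + 1) * 2)
--         string_to_return += "0" * (x + 1)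
--         string_to_return += "\n"
--
--     return add_space(string_to_return)
-- ===== SOURCE B (Python) =====
-- def gen_circle(size: int) -> str:
--     """Same circle, built as a table of per-row zero-counts then one uniform row pass."""
--     zeros = [size // 6 - x for x in range(size // 6)]
--     zeros += [0] * (size - size // 3)
--     zeros += [x + 1 for x in range(int(size / 6))]
--     return "".join("0 " * z + "1 " * (size - 2 * z) + "0 " * z + "\n" for z in zeros)
-- ===== Notes on version B (the rewrite author's own statement) =====
-- stated objective: simpler
-- what changed: B first builds one flat table of per-row zero-counts (descending counts, the all-ones middle block as zeros, ascending counts) and then emits every line with a single uniform already-spaced row formula joined in one pass, replacing A's three separate drawing loops, the dead else branch, and the final add_space character walk.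
import Mathlib
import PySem

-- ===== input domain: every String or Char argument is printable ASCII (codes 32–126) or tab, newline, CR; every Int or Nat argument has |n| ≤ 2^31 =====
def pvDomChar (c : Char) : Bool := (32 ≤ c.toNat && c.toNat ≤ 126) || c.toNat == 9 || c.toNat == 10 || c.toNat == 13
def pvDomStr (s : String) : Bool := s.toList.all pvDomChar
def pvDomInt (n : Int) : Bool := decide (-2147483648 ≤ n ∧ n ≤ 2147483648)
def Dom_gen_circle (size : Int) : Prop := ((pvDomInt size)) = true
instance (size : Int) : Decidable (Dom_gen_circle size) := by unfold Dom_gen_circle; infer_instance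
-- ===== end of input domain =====

-- B replaces A's three interleaved drawing loops by a table of per-row zero-counts plus one
-- uniform row formula that emits the spaced row directly (objective: simpler).

-- ===== PORT A =====
-- "c" * n for a single character (strings as char lists); .toNat clamps a negative count to 0, as Python does
def pvRep (c : Char) (n : Int) : List Char := List.replicate n.toNat c

-- add_space: the Python loop, character by character
def add_space_chars (cs : List Char) : List Char :=
  cs.foldl (fun acc c => if c ≠ '\n' then acc ++ [c, ' '] else acc ++ [c]) []

-- int(size/6) and int(size/3) are PySem.Int.truncdiv (exact here: |size| ≤ 2^31 < 2^53);
-- math.ceil(size - size//3) applied to an int is that int.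
def gen_circle (size : Int) : String :=
  let s1 := (PySem.List.pyRange 0 (PySem.Int.floordiv size (3*2)) 1).foldl
    (fun acc x =>
      acc ++ pvRep '0' (PySem.Int.truncdiv size (3*2) - x)
          ++ pvRep '1' (size - (PySem.Int.truncdiv size (3*2) - x) * 2)
          ++ pvRep '0' (PySem.Int.truncdiv size (3*2) - x)
          ++ ['\n']) []
  let s2 := (PySem.List.pyRange 0 (size - PySem.Int.floordiv size 3) 1).foldl
    (fun acc x =>
      if x ≤ size then
        acc ++ pvRep '1' size ++ ['\n']
      else
        acc ++ pvRep '1' (PySem.Int.truncdiv size 3) ++ ['\n']) s1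
  let s3 := (PySem.List.pyRange 0 (PySem.Int.truncdiv size (3*2)) 1).foldl
    (fun acc x =>
      acc ++ pvRep '0' (x + 1) ++ pvRep '1' (size - (x + 1) * 2) ++ pvRep '0' (x + 1) ++ ['\n']) s2
  String.ofList (add_space_chars s3)

-- ===== PORT B =====
def gen_circle_alt (size : Int) : String :=
  let zeros : List Int :=
    ((PySem.List.pyRange 0 (PySem.Int.floordiv size 6) 1).map
        (fun x => PySem.Int.floordiv size 6 - x)
      ++ List.replicate (size - PySem.Int.floordiv size 3).toNat 0)
      ++ (PySem.List.pyRange 0 (PySem.Int.truncdiv size 6) 1).map (fun x => x + 1)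
  String.ofList ((zeros.map (fun z =>
      PySem.List.pyRepeat ['0', ' '] z ++ PySem.List.pyRepeat ['1', ' '] (size - 2 * z)
        ++ PySem.List.pyRepeat ['0', ' '] z ++ ['\n'])).flatten)

-- ===== PRECONDITION & SPEC =====
def Spec_gen_circle (size : Int) (out : String) : Prop := out = gen_circle_alt size
instance (size : Int) (out : String) : Decidable (Spec_gen_circle size out) := by unfold Spec_gen_circle; infer_instance

-- ===== CLAIM (what is proved, stated in full; the proofs are below) =====
def Claim_equal_gen_circle : Prop := ∀ (size : Int), Dom_gen_circle size → Spec_gen_circle size (gen_circle size)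

-- ===== LEMMAS AND PROOFS =====

-- add_space's per-character contribution
def pvG (c : Char) : List Char := if c ≠ '\n' then [c, ' '] else [c]

-- A's row for zero-count z, and B's (already spaced) row for zero-count z
def pvRowA (size z : Int) : List Char :=
  pvRep '0' z ++ (pvRep '1' (size - z * 2) ++ (pvRep '0' z ++ ['\n']))
def pvRowB (size z : Int) : List Char :=
  PySem.List.pyRepeat ['0', ' '] z ++ (PySem.List.pyRepeat ['1', ' '] (size - 2 * z)
    ++ (PySem.List.pyRepeat ['0', ' '] z ++ ['\n']))

theorem add_space_chars_eq_flatMap (cs : List Char) :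
    add_space_chars cs = cs.flatMap pvG := by
  unfold add_space_chars
  rw [PySem.List.foldl_congr_mem' cs _ (fun acc c => acc ++ pvG c) []
    (by intro c _ acc; simp only [pvG]; split <;> rfl)]
  simpa using PySem.List.foldl_append_eq_flatMap pvG cs []

theorem pvRep_flatMap (c : Char) (h : c ≠ '\n') (z : Int) :
    (pvRep c z).flatMap pvG = PySem.List.pyRepeat [c, ' '] z := by
  unfold pvRep PySem.List.pyRepeat
  generalize z.toNat = n
  induction n with
  | zero => rfl
  | succ n ih => simp [List.replicate_succ, pvG, h, ih]

theorem pvRow_flatMap (size z : Int) :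
    (pvRowA size z).flatMap pvG = pvRowB size z := by
  have h2 : size - z * 2 = size - 2 * z := by ring
  simp [pvRowA, pvRowB, pvRep_flatMap, pvG, h2]

theorem flatMap_const {α β : Type} (l : List α) (r : List β) :
    l.flatMap (fun _ => r) = (List.replicate l.length r).flatten := by
  induction l with
  | nil => rfl
  | cons a l ih => simp [List.replicate_succ, ih]

theorem flatMap_replicate {α β : Type} (n : Nat) (x : α) (f : α → List β) :
    (List.replicate n x).flatMap f = (List.replicate n (f x)).flatten := by
  induction n with
  | zero => rfl
  | succ n ih => simp [List.replicate_succ, ih]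

theorem gen_circle_eq (size : Int) : gen_circle size = gen_circle_alt size := by
  have h6 : PySem.Int.floordiv size 6 = size / 6 :=
    PySem.Int.floordiv_eq_ediv_of_pos (by norm_num)
  have h3 : PySem.Int.floordiv size 3 = size / 3 :=
    PySem.Int.floordiv_eq_ediv_of_pos (by norm_num)
  unfold gen_circle gen_circle_alt
  dsimp only []
  -- loop 1: truncdiv = floordiv on every index actually visited, and the body is a row
  rw [PySem.List.foldl_congr_mem' _
      (fun acc x =>
        acc ++ pvRep '0' (PySem.Int.truncdiv size (3*2) - x)
            ++ pvRep '1' (size - (PySem.Int.truncdiv size (3*2) - x) * 2)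
            ++ pvRep '0' (PySem.Int.truncdiv size (3*2) - x)
            ++ ['\n'])
      (fun acc x => acc ++ pvRowA size (PySem.Int.floordiv size 6 - x)) []
      (by
        intro x hx acc
        rcases PySem.List.mem_pyRange_one.mp hx with ⟨hx0, hxlt⟩
        have hs : 0 ≤ size := by
          rw [show (3*2 : Int) = 6 by norm_num, h6] at hxlt; omega
        have ht : PySem.Int.truncdiv size 6 = PySem.Int.floordiv size 6 := by
          simp [PySem.Int.truncdiv, Int.tdiv_eq_ediv_of_nonneg hs]
        simp [show (3*2 : Int) = 6 by norm_num, ht, pvRowA, List.append_assoc]),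
    PySem.List.foldl_append_eq_flatMap]
  -- loop 2: the 'x ≤ size' branch always fires; its body is the zero-count-0 row
  rw [PySem.List.foldl_congr_mem' _
      (fun acc x =>
        if x ≤ size then
          acc ++ pvRep '1' size ++ ['\n']
        else
          acc ++ pvRep '1' (PySem.Int.truncdiv size 3) ++ ['\n'])
      (fun acc (_ : Int) => acc ++ pvRowA size 0) _
      (by
        intro x hx acc
        rcases PySem.List.mem_pyRange_one.mp hx with ⟨hx0, hxlt⟩
        have hxs : x ≤ size := by rw [h3] at hxlt; omega
        simp [hxs, pvRowA, pvRep, List.append_assoc]),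
    PySem.List.foldl_append_eq_flatMap]
  -- loop 3: the body is a row
  rw [PySem.List.foldl_congr_mem' _
      (fun acc x =>
        acc ++ pvRep '0' (x + 1) ++ pvRep '1' (size - (x + 1) * 2) ++ pvRep '0' (x + 1) ++ ['\n'])
      (fun acc x => acc ++ pvRowA size (x + 1)) _
      (by
        intro x hx acc
        simp [pvRowA, List.append_assoc]),
    PySem.List.foldl_append_eq_flatMap]
  rw [add_space_chars_eq_flatMap]
  simp only [List.nil_append, List.append_assoc, List.flatMap_append, List.flatMap_assoc,
    pvRow_flatMap]
  -- both sides are now flatMaps of pvRowB over the same row lists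
  rw [← List.flatMap_def]
  simp only [List.flatMap_append, List.flatMap_map, flatMap_replicate]
  rw [flatMap_const, PySem.List.length_pyRange_one]
  norm_num [pvRowB]

-- ===== VERDICT (by name: the statement is the Claim_ definition above) =====
theorem gen_circle_spec : Claim_equal_gen_circle := by
  intro size _
  unfold Spec_gen_circle
  exact gen_circle_eq size
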